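-- pv_equiv track=rewrite | github.com/lhy0807/A2CS | Ch25/recursion1.py | array6
-- ===== SOURCE A (Python) =====
-- def array6(nums, i):
-- 	nums = nums[i:]
-- 	if (len(nums) == 0): return False
-- 	if (len(nums) == 1):
-- 		if nums == [6]: return True
-- 		else: return False
-- 	else:
-- 		return array6(nums[:1],0) or array6(nums,1)
-- ===== SOURCE B (Python) =====
-- def array6(nums, i):
--     for x in nums[i:]:
--         if x == 6:
--             return True
--     return False
-- ===== Notes on version B (the rewrite author's own statement) =====
-- stated objective: simpler
-- what changed: Replaces A's recursive head/tail decomposition (which copies a slice at every recursive step) with a single flat iterative scan over nums[i:] that returns at the first 6.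
import Mathlib
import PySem

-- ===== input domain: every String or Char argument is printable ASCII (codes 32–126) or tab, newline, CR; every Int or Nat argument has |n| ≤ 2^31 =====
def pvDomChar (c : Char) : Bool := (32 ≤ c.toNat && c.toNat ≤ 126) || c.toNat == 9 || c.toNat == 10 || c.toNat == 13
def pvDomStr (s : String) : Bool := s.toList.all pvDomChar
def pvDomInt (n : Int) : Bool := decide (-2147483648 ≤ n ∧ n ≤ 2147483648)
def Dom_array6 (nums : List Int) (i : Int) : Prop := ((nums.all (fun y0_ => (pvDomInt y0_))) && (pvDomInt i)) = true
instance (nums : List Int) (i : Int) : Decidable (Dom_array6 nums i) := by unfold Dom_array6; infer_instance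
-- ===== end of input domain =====

-- B replaces A's recursive head/tail decomposition with a flat iterative scan over nums[i:] (simpler).

-- B replaces A's recursive head/tail decomposition with a flat iterative scan over nums[i:] (simpler).

-- ===== PORT A =====
-- literal port of A's recursion: nums becomes nums[i:]; cases on its length; the else
-- branch recurses on nums[:1] (with i = 0) and on (nums, 1), joined by `or`.
def array6 (nums : List Int) (i : Int) : Bool :=
  if (PySem.List.slice nums (some i) none).length = 0 then false
  else if (PySem.List.slice nums (some i) none).length = 1 then
    (PySem.List.slice nums (some i) none == [6])
  else
    array6 (PySem.List.slice (PySem.List.slice nums (some i) none) none (some 1)) 0 ||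
    array6 (PySem.List.slice nums (some i) none) 1
termination_by (PySem.List.slice nums (some i) none).length
decreasing_by
  · rw [PySem.List.slice_from _ (by omega : (0:Int) ≤ 0),
       PySem.List.slice_to _ (by omega : (0:Int) ≤ 1)]
    simp
    omega
  · rw [PySem.List.slice_from_one]
    simp [List.length_tail]
    omega

-- ===== PORT B =====
-- the for-loop of Source B: scan the slice, return True at the first element equal to 6
def array6AltLoop : List Int → Bool
  | [] => false
  | x :: rest => if x = 6 then true else array6AltLoop rest

def array6_alt (nums : List Int) (i : Int) : Bool :=
  array6AltLoop (PySem.List.slice nums (some i) none)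

-- ===== PRECONDITION & SPEC =====
def Spec_array6 (nums : List Int) (i : Int) (out : Bool) : Prop := out = array6_alt nums i
instance (nums : List Int) (i : Int) (out : Bool) : Decidable (Spec_array6 nums i out) := by unfold Spec_array6; infer_instance

-- ===== CLAIM (what is proved, stated in full; the proofs are below) =====
def Claim_equal_array6 : Prop := ∀ (nums : List Int) (i : Int), Dom_array6 nums i → Spec_array6 nums i (array6 nums i)

-- ===== LEMMAS AND PROOFS =====

lemma array6_eq_loop : ∀ (n : Nat) (nums : List Int) (i : Int),
    (PySem.List.slice nums (some i) none).length ≤ n →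
    array6 nums i = array6AltLoop (PySem.List.slice nums (some i) none) := by
  intro n
  induction n with
  | zero =>
    intro nums i h
    rw [array6.eq_def]
    have hnil : PySem.List.slice nums (some i) none = [] :=
      List.eq_nil_of_length_eq_zero (Nat.le_zero.mp h)
    simp [hnil, array6AltLoop]
  | succ n ih =>
    intro nums i h
    rw [array6.eq_def]
    generalize hns : PySem.List.slice nums (some i) none = ns at h ⊢
    match ns with
    | [] => simp [array6AltLoop]
    | [x] =>
      simp [array6AltLoop]
      by_cases hx : x = 6 <;> simp [hx]
    | x :: y :: rest =>
      rw [if_neg (by simp), if_neg (by simp)]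
      have e0 : PySem.List.slice (x :: y :: rest) none (some 1) = [x] := by
        rw [PySem.List.slice_to _ (by omega : (0:Int) ≤ 1)]; rfl
      have e1 : PySem.List.slice ([x] : List Int) (some 0) none = [x] := by
        rw [PySem.List.slice_from _ (by omega : (0:Int) ≤ 0)]; rfl
      have e2 : PySem.List.slice (x :: y :: rest) (some 1) none = y :: rest := by
        rw [PySem.List.slice_from_one]; rfl
      have hlen : (x :: y :: rest).length ≤ n + 1 := h
      have r1 := ih [x] 0 (by rw [e1]; simp at hlen ⊢ <;> omega)
      have r2 := ih (x :: y :: rest) 1 (by rw [e2]; simp at hlen ⊢ <;> omega)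
      rw [e0, r1, r2, e1, e2]
      simp [array6AltLoop]

-- ===== VERDICT (by name: the statement is the Claim_ definition above) =====
theorem array6_spec : Claim_equal_array6 := by
  intro nums i _
  unfold Spec_array6 array6_alt
  exact array6_eq_loop _ nums i le_rfl
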